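-- pv_equiv track=rewrite | github.com/minkyungbae/Study-about | 프로그래머스/0/181874. A 강조하기/A 강조하기.py | solution
-- ===== SOURCE A (Python) =====
-- def solution(myString):
--     answer = ''
--
--     for i in myString:
--         if i == 'a':
--             answer += i.upper()
--         elif i == 'A':
--             answer += 'A'
--         else:
--             answer += i.lower()
--
--     return answer
-- ===== SOURCE B (Python) =====
-- def solution(myString):
--     return myString.lower().replace('a', 'A')
-- ===== Notes on version B (the rewrite author's own statement) =====
-- stated objective: idiomatic
-- what changed: Replaced the per-character if/elif accumulator loop with two whole-string library passes: lowercase the whole string, then one replace substituting each lowercase-a with its uppercase form.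
import Mathlib
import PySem

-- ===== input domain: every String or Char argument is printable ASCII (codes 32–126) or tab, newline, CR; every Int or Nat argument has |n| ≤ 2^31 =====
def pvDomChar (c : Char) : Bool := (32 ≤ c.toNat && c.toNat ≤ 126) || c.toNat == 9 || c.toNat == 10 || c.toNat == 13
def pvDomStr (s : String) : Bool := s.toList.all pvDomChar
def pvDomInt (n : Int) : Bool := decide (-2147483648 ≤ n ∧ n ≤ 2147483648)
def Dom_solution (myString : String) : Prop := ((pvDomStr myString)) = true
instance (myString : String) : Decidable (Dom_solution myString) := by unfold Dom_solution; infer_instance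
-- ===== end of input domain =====

-- B replaces A's per-character if/elif accumulator loop with two whole-string passes (lower, then replace 'a'→'A'); objective: idiomatic.

-- ===== PORT A =====
def solution (myString : String) : String :=
  String.ofList <|
    myString.toList.foldl
      (fun answer i =>
        if i = 'a' then answer ++ [PySem.Chars.upperChar i]
        else if i = 'A' then answer ++ ['A']
        else answer ++ [PySem.Chars.lowerChar i])
      []

-- ===== PORT B =====
def solution_alt (myString : String) : String :=
  PySem.Str.replace (PySem.Str.lower myString) "a" "A"

-- ===== PRECONDITION & SPEC =====
def Spec_solution (myString : String) (out : String) : Prop := out = solution_alt myString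
instance (myString : String) (out : String) : Decidable (Spec_solution myString out) := by unfold Spec_solution; infer_instance

-- ===== CLAIM (what is proved, stated in full; the proofs are below) =====
def Claim_equal_solution : Prop := ∀ (myString : String), Dom_solution myString → Spec_solution myString (solution myString)

-- ===== LEMMAS AND PROOFS =====

-- A's per-character transform
def pvF (c : Char) : Char :=
  if c = 'a' then PySem.Chars.upperChar c
  else if c = 'A' then 'A'
  else PySem.Chars.lowerChar c

-- B's second pass, character-wise
def pvG (c : Char) : Char := if c = 'a' then 'A' else c

lemma pvG_lower (c : Char) : pvG (PySem.Chars.lowerChar c) = pvF c := by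
  by_cases hu : PySem.Chars.isupper c = true
  · have h1 : 65 ≤ c.toNat ∧ c.toNat ≤ 90 := by
      simp only [PySem.Chars.isupper, Bool.and_eq_true, decide_eq_true_eq] at hu
      exact ⟨Nat.succ_le_of_lt hu.1, Nat.lt_succ_iff.mp (Nat.lt_succ_of_le hu.2)⟩
    have hc : c = Char.ofNat c.toNat := (Char.ofNat_toNat c).symm
    obtain ⟨ha, hb⟩ := h1
    rw [hc]
    set n := c.toNat with hn
    interval_cases n <;> decide
  · have hl : PySem.Chars.lowerChar c = c := by simp [PySem.Chars.lowerChar, hu]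
    rw [hl]
    unfold pvG pvF
    by_cases ha : c = 'a'
    · subst ha; decide
    · by_cases hA : c = 'A'
      · subst hA; exact absurd (by decide) hu
      · simp [ha, hA, hl]

lemma pvGo_eq (fuel : Nat) : ∀ (l acc : List Char), l.length ≤ fuel →
    PySem.Chars.replace.go ['a'] ['A'] fuel l acc = acc.reverse ++ l.map pvG := by
  induction fuel with
  | zero =>
    intro l acc h
    have : l = [] := List.eq_nil_of_length_eq_zero (Nat.le_zero.mp h)
    subst this
    simp [PySem.Chars.replace.go]
  | succ n ih =>
    intro l acc h
    cases l with
    | nil => simp [PySem.Chars.replace.go]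
    | cons c t =>
      by_cases hc : c = 'a'
      · subst hc
        have hpre : List.isPrefixOf ['a'] ('a' :: t) = true := by simp [List.isPrefixOf]
        simp only [PySem.Chars.replace.go, hpre, if_true]
        rw [ih _ _ (by simpa using Nat.le_of_succ_le_succ h)]
        simp [pvG]
      · have hpre : List.isPrefixOf ['a'] (c :: t) = false := by
          simp [List.isPrefixOf, Ne.symm hc]
        simp only [PySem.Chars.replace.go, hpre]
        rw [if_neg (by simp [hc]), ih _ _ (by simpa using Nat.le_of_succ_le_succ h)]
        simp [pvG, hc]

lemma pvFoldl_eq (l : List Char) :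
    l.foldl
      (fun answer i =>
        if i = 'a' then answer ++ [PySem.Chars.upperChar i]
        else if i = 'A' then answer ++ ['A']
        else answer ++ [PySem.Chars.lowerChar i])
      [] = l.map pvF := by
  have : ∀ (answer : List Char) (i : Char),
      (if i = 'a' then answer ++ [PySem.Chars.upperChar i]
       else if i = 'A' then answer ++ ['A']
       else answer ++ [PySem.Chars.lowerChar i]) = answer ++ [pvF i] := by
    intro answer i
    unfold pvF
    split_ifs <;> rfl
  calc l.foldl _ [] = l.foldl (fun acc x => acc ++ [pvF x]) [] := by
        apply PySem.List.foldl_congr_mem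
        intro b a _; exact this b a
    _ = l.map pvF := by
        simpa using PySem.List.foldl_append_singleton_eq_map pvF l []

-- ===== VERDICT (by name: the statement is the Claim_ definition above) =====
theorem solution_spec : Claim_equal_solution := by
  intro s _
  unfold Spec_solution solution solution_alt PySem.Str.replace
  rw [pvFoldl_eq]
  congr 1
  rw [PySem.Str.toList_lower]
  show _ = PySem.Chars.replace (PySem.Chars.lower s.toList) ['a'] ['A']
  unfold PySem.Chars.replace
  rw [if_neg (by decide)]
  rw [pvGo_eq _ _ _ (by simp [PySem.Chars.lower])]
  simp [PySem.Chars.lower, pvG_lower]
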